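-- pv_equiv track=rewrite | github.com/Alexander-Berg/Tech-Docs-Examples | Test cases/TestPalmAverage (2).py | cluster_runs
-- ===== SOURCE A (Python) =====
-- def cluster_runs(testruns):
--     sorted_runs = sorted(testruns[:], key=lambda r: r['finishedTime'])
--     cluster_set = []
--     current_cluster = [sorted_runs[0]]
--     for index in range(1, len(sorted_runs)):
--         run = sorted_runs[index]
--         if run['startedTime'] - current_cluster[len(current_cluster) - 1]['finishedTime'] < 120000:  # 3 минута
--             current_cluster.append(run)
--         else:
--             cluster_set.append(current_cluster)
--             current_cluster = [run]
--     cluster_set.append(current_cluster)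
--     return cluster_set
-- ===== SOURCE B (Python) =====
-- def cluster_runs(testruns):
--     sorted_runs = sorted(testruns, key=lambda r: r['finishedTime'])
--     if not sorted_runs:
--         return []
--     n = len(sorted_runs)
--     splits = [i for i in range(1, n)
--               if sorted_runs[i]['startedTime'] - sorted_runs[i - 1]['finishedTime'] >= 120000]
--     bounds = [0] + splits + [n]
--     return [sorted_runs[lo:hi] for lo, hi in zip(bounds, bounds[1:])]
-- ===== Notes on version B (the rewrite author's own statement) =====
-- stated objective: alternative
-- what changed: Instead of growing a current_cluster and emitting clusters one at a time, B computes the list of break indices (where the start/finish gap is >= 120000) in one comprehension and then slices the sorted list at those boundaries.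
-- crash fix: On the empty list A raises IndexError at sorted_runs[0]; B returns the empty clustering []. — e.g. on cluster_runs([]): A raises IndexError, B returns []
import Mathlib
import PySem

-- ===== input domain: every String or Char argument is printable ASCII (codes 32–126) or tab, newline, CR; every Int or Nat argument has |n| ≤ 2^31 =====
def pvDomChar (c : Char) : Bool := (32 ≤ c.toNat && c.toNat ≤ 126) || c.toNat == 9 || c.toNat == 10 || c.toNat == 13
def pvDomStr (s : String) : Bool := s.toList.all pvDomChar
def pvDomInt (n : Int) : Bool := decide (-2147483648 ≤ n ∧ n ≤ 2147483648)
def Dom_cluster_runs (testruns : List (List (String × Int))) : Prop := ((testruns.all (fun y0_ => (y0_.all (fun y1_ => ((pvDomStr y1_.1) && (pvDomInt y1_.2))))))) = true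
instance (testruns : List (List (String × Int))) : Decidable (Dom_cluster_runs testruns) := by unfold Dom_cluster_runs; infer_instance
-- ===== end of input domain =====

-- B replaces A's incremental current-cluster loop by computing the break indices explicitly
-- and slicing the sorted list at them (objective: alternative decomposition, same cost).
-- On the empty list A raises IndexError while B returns [] (see Raises_ block).


-- r['finishedTime'] / r['startedTime']: first-match lookup in the association list, default 0
-- (the default is only reached outside Pre_, where Python raises KeyError)
def pvFin (r : List (String × Int)) : Int := (List.lookup "finishedTime" r).getD 0
def pvStart (r : List (String × Int)) : Int := (List.lookup "startedTime" r).getD 0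
def pvHasKey (r : List (String × Int)) (k : String) : Bool := r.any (fun p => p.1 == k)

-- ===== PORT A =====
def cluster_runs (testruns : List (List (String × Int))) : List (List (List (String × Int))) :=
  let sorted_runs := PySem.List.sorted testruns (fun r => pvFin r) false
  if sorted_runs.isEmpty then []  -- Python raises IndexError at sorted_runs[0]; excluded by Pre_
  else
    -- current_cluster = [sorted_runs[0]]; for index in range(1, len(sorted_runs)): run = sorted_runs[index]
    let st := (sorted_runs.drop 1).foldl
      (fun (st : List (List (List (String × Int))) × List (List (String × Int))) run =>
        if pvStart run - pvFin (PySem.List.pyGetD st.2 (PySem.List.len st.2 - 1) []) < 120000 then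
          (st.1, st.2 ++ [run])
        else
          (st.1 ++ [st.2], [run]))
      ([], [sorted_runs.headD []])
    st.1 ++ [st.2]

-- ===== PORT B =====
def cluster_runs_alt (testruns : List (List (String × Int))) : List (List (List (String × Int))) :=
  let sorted_runs := PySem.List.sorted testruns (fun r => pvFin r) false
  if sorted_runs.isEmpty then []
  else
    let n : Int := PySem.List.len sorted_runs
    let splits := (PySem.List.pyRange 1 n 1).filter
      (fun i => decide (120000 ≤ pvStart (PySem.List.pyGetD sorted_runs i []) -
                        pvFin (PySem.List.pyGetD sorted_runs (i - 1) [])))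
    let bounds := 0 :: (splits ++ [n])
    (bounds.zip bounds.tail).map (fun p => PySem.List.slice sorted_runs (some p.1) (some p.2))

-- ===== PRECONDITION & SPEC =====
-- Exactly the inputs on which A returns: nonempty, every run has 'finishedTime', and every run
-- that is not the stable minimum by 'finishedTime' (= sorted_runs[0], whose 'startedTime' A
-- never reads) has 'startedTime'; elsewhere Python raises IndexError or KeyError.
def Pre_cluster_runs (testruns : List (List (String × Int))) : Prop :=
  testruns ≠ [] ∧
  (∀ r ∈ testruns, pvHasKey r "finishedTime" = true) ∧
  (∀ i, i < testruns.length →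
    (∃ j, j < testruns.length ∧
      ((j < i ∧ pvFin (testruns.getD j []) ≤ pvFin (testruns.getD i [])) ∨
       pvFin (testruns.getD j []) < pvFin (testruns.getD i []))) →
    pvHasKey (testruns.getD i []) "startedTime" = true)
instance (testruns : List (List (String × Int))) : Decidable (Pre_cluster_runs testruns) := by
  unfold Pre_cluster_runs; infer_instance

def pvWitness_cluster_runs : (List (List (String × Int))) :=
  [[("finishedTime", 0), ("startedTime", 130000)], [("finishedTime", 200000), ("startedTime", 1)]]

-- On the empty list A raises IndexError (sorted_runs[0]); B returns the empty clustering [].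
def Raises_cluster_runs (testruns : List (List (String × Int))) : Prop := testruns = []
instance (testruns : List (List (String × Int))) : Decidable (Raises_cluster_runs testruns) := by
  unfold Raises_cluster_runs; infer_instance
def pvRaiseWitness_cluster_runs : (List (List (String × Int))) := []
def pvRaiseWitnessOut_cluster_runs : List (List (List (String × Int))) := []

def Spec_cluster_runs (testruns : List (List (String × Int))) (out : List (List (List (String × Int)))) : Prop := out = cluster_runs_alt testruns
instance (testruns : List (List (String × Int))) (out : List (List (List (String × Int)))) : Decidable (Spec_cluster_runs testruns out) := by unfold Spec_cluster_runs; infer_instance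

-- ===== CLAIM (what is proved, stated in full; the proofs are below) =====
def Claim_equal_cluster_runs : Prop := ∀ (testruns : List (List (String × Int))), Dom_cluster_runs testruns → Pre_cluster_runs testruns → Spec_cluster_runs testruns (cluster_runs testruns)
def Claim_raises_cluster_runs : Prop := (∀ (testruns : List (List (String × Int))), Dom_cluster_runs testruns → Raises_cluster_runs testruns → ¬ Pre_cluster_runs testruns) ∧ (Dom_cluster_runs (pvRaiseWitness_cluster_runs) ∧ Raises_cluster_runs (pvRaiseWitness_cluster_runs) ∧ cluster_runs_alt (pvRaiseWitness_cluster_runs) = pvRaiseWitnessOut_cluster_runs)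

-- ===== LEMMAS AND PROOFS =====

-- middleman: structural grouping of a (sorted) list into gap clusters
def pvGrp : List (List (String × Int)) → List (List (List (String × Int)))
  | [] => []
  | [x] => [[x]]
  | x :: y :: t =>
      if pvStart y - pvFin x < 120000 then
        match pvGrp (y :: t) with
        | c :: cs => (x :: c) :: cs
        | [] => [[x]]
      else [x] :: pvGrp (y :: t)

lemma pvGrp_ne_nil : ∀ (s : List (List (String × Int))), s ≠ [] → pvGrp s ≠ []
  | [], h => absurd rfl h
  | [x], _ => by simp [pvGrp]
  | x :: y :: t, _ => by
      simp only [pvGrp]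
      split
      · cases hg : pvGrp (y :: t) <;> simp
      · simp

lemma pvLast_concat (cc : List (List (String × Int))) (x : List (String × Int)) :
    PySem.List.pyGetD (cc ++ [x]) (PySem.List.len (cc ++ [x]) - 1) [] = x := by
  have h1 : PySem.List.len (cc ++ [x]) - 1 = ((cc.length : Int)) := by
    simp [PySem.List.len_eq]
  rw [h1, PySem.List.pyGetD_natCast]
  simp

-- A's loop, characterised against pvGrp
lemma pvLoopA : ∀ (rest : List (List (String × Int)))
    (cs : List (List (List (String × Int)))) (cc : List (List (String × Int)))
    (x : List (String × Int)),
    (let st := rest.foldl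
      (fun (st : List (List (List (String × Int))) × List (List (String × Int))) run =>
        if pvStart run - pvFin (PySem.List.pyGetD st.2 (PySem.List.len st.2 - 1) []) < 120000 then
          (st.1, st.2 ++ [run])
        else
          (st.1 ++ [st.2], [run]))
      (cs, cc ++ [x])
     st.1 ++ [st.2]) =
    cs ++ (match pvGrp (x :: rest) with
           | c :: cs' => (cc ++ c) :: cs'
           | [] => [cc ++ [x]])
  | [], cs, cc, x => by simp [pvGrp]
  | y :: t, cs, cc, x => by
      simp only [List.foldl_cons, pvLast_concat]
      by_cases hgap : pvStart y - pvFin x < 120000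
      · rw [if_pos hgap]
        have ih := pvLoopA t cs (cc ++ [x]) y
        simp only [List.append_assoc] at ih ⊢
        rw [ih]
        have hne := pvGrp_ne_nil (y :: t) (by simp)
        simp only [pvGrp, if_pos hgap]
        cases hg : pvGrp (y :: t) with
        | nil => exact absurd hg hne
        | cons c cs' => simp
      · rw [if_neg hgap]
        have ih := pvLoopA t (cs ++ [cc ++ [x]]) [] y
        simp only [List.nil_append] at ih
        rw [ih]
        have hne := pvGrp_ne_nil (y :: t) (by simp)
        simp only [pvGrp, if_neg hgap]
        cases hg : pvGrp (y :: t) with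
        | nil => exact absurd hg hne
        | cons c cs' => simp

lemma pvA_eq_grp (r0 : List (String × Int)) (rest : List (List (String × Int))) :
    (let st := rest.foldl
         (fun (st : List (List (List (String × Int))) × List (List (String × Int))) run =>
           if pvStart run - pvFin (PySem.List.pyGetD st.2 (PySem.List.len st.2 - 1) []) < 120000 then
             (st.1, st.2 ++ [run])
           else
             (st.1 ++ [st.2], [run]))
         ([], [r0])
     st.1 ++ [st.2]) = pvGrp (r0 :: rest) := by
  have h := pvLoopA rest [] [] r0
  simp only [List.nil_append] at h
  rw [h]
  have hne := pvGrp_ne_nil (r0 :: rest) (by simp)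
  cases hg : pvGrp (r0 :: rest) with
  | nil => exact absurd hg hne
  | cons c cs' => simp

-- B at Nat level
def pvBrk (s : List (List (String × Int))) (k : Nat) : Bool :=
  decide (120000 ≤ pvStart (s.getD (k + 1) []) - pvFin (s.getD k []))

def pvCut (s : List (List (String × Int))) (bounds : List Nat) : List (List (List (String × Int))) :=
  (bounds.zip bounds.tail).map (fun p => (s.drop p.1).take (p.2 - p.1))

def pvSliceB (s : List (List (String × Int))) : List (List (List (String × Int))) :=
  pvCut s (0 :: (((List.range (s.length - 1)).filter (pvBrk s)).map (· + 1) ++ [s.length]))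

lemma pvCut_shift (x : List (String × Int)) (s : List (List (String × Int))) (b : List Nat) :
    pvCut (x :: s) (b.map (· + 1)) = pvCut s b := by
  simp only [pvCut, ← List.map_tail, List.zip_map, List.map_map]
  apply List.map_congr_left
  intro p _
  simp [Nat.add_sub_add_right]

lemma pvB_eq_sliceB (s : List (List (String × Int))) :
    (let n : Int := PySem.List.len s
     let splits := (PySem.List.pyRange 1 n 1).filter
       (fun i => decide (120000 ≤ pvStart (PySem.List.pyGetD s i []) -
                         pvFin (PySem.List.pyGetD s (i - 1) [])))
     let bounds := 0 :: (splits ++ [n])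
     (bounds.zip bounds.tail).map (fun p => PySem.List.slice s (some p.1) (some p.2))) =
    pvSliceB s := by
  simp only [PySem.List.len_eq]
  have hrange : PySem.List.pyRange 1 (s.length : Int) 1 =
      (List.range (s.length - 1)).map (fun k => ((k + 1 : Nat) : Int)) := by
    rw [PySem.List.pyRange_one]
    have : (((s.length : Int) - 1)).toNat = s.length - 1 := by omega
    rw [this]
    apply List.map_congr_left
    intro k _
    push_cast
    ring
  rw [hrange, List.filter_map]
  have hfil : ∀ k ∈ List.range (s.length - 1),
      ((fun i => decide (120000 ≤ pvStart (PySem.List.pyGetD s i []) -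
                         pvFin (PySem.List.pyGetD s (i - 1) []))) ∘
       (fun k : Nat => ((k + 1 : Nat) : Int))) k = pvBrk s k := by
    intro k _
    simp only [Function.comp]
    have h1 : ((k + 1 : Nat) : Int) - 1 = ((k : Nat) : Int) := by push_cast; ring
    rw [h1, PySem.List.pyGetD_natCast, PySem.List.pyGetD_natCast]
    rfl
  rw [List.filter_congr hfil]
  -- bounds as a map of the Nat-level bounds
  have hbounds : (0 :: ((((List.range (s.length - 1)).filter (pvBrk s)).map
        (fun k : Nat => ((k + 1 : Nat) : Int))) ++ [(s.length : Int)])) =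
      (0 :: (((List.range (s.length - 1)).filter (pvBrk s)).map (· + 1) ++ [s.length])).map
        (fun n : Nat => (n : Int)) := by
    simp [List.map_map, Function.comp]
  rw [hbounds]
  simp only [pvSliceB, pvCut, ← List.map_tail, List.zip_map, List.map_map]
  apply List.map_congr_left
  intro p _
  simp only [Function.comp, Prod.map]
  rw [PySem.List.slice_natCast]

lemma pvCut_cons (s : List (List (String × Int))) (a b : Nat) (l : List Nat) :
    pvCut s (a :: b :: l) = ((s.drop a).take (b - a)) :: pvCut s (b :: l) := rfl

lemma pvSliceB_eq_grp : ∀ (s : List (List (String × Int))), s ≠ [] → pvSliceB s = pvGrp s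
  | [], h => absurd rfl h
  | [x], _ => by simp [pvSliceB, pvCut, pvGrp]
  | x :: y :: t, _ => by
      have ih := pvSliceB_eq_grp (y :: t) (by simp)
      have hfm : (List.map Nat.succ (List.range t.length)).filter (pvBrk (x :: y :: t)) =
          ((List.range t.length).filter (pvBrk (y :: t))).map Nat.succ := by
        rw [List.filter_map]
        congr 1
      have hsplit : (List.range ((x :: y :: t).length - 1)).filter (pvBrk (x :: y :: t)) =
          (if pvBrk (x :: y :: t) 0 = true then [0] else []) ++
          ((List.range t.length).filter (pvBrk (y :: t))).map Nat.succ := by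
        rw [show (x :: y :: t).length - 1 = t.length + 1 by simp,
          List.range_succ_eq_map, List.filter_cons, hfm]
        split <;> simp
      have htl : (List.range ((y :: t).length - 1)).filter (pvBrk (y :: t)) =
          (List.range t.length).filter (pvBrk (y :: t)) := by simp
      by_cases hb : pvBrk (x :: y :: t) 0 = true
      · -- break between x and y: first cluster is [x]
        have hA : pvSliceB (x :: y :: t) = [x] :: pvSliceB (y :: t) := by
          unfold pvSliceB
          rw [hsplit, htl, if_pos hb]
          generalize (List.range t.length).filter (pvBrk (y :: t)) = G
          have e1 : (([0] ++ G.map Nat.succ).map (· + 1 : Nat → Nat) ++ [(x :: y :: t).length]) =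
              1 :: (G.map (· + 1) ++ [(y :: t).length]).map (· + 1) := by
            simp [Nat.succ_eq_add_one, List.map_map, Function.comp_def]
          rw [e1, pvCut_cons]
          have e2 : ((1 : Nat) :: (G.map (· + 1 : Nat → Nat) ++ [(y :: t).length]).map (· + 1)) =
              (0 :: (G.map (· + 1) ++ [(y :: t).length])).map (· + 1) := by simp
          rw [e2, pvCut_shift]
          rfl
        rw [hA, ih]
        have hb' : ¬ pvStart y - pvFin x < 120000 := by
          simp only [pvBrk, List.getD_cons_zero, List.getD_cons_succ, decide_eq_true_eq] at hb
          omega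
        simp only [pvGrp, if_neg hb']
      · -- no break: x joins the first cluster of the tail clustering
        obtain ⟨r0, rest', hr⟩ := List.exists_cons_of_ne_nil
          (show ((List.range t.length).filter (pvBrk (y :: t))).map (· + 1) ++
              [(y :: t).length] ≠ [] by simp)
        have htail : pvSliceB (y :: t) = ((y :: t).take r0) :: pvCut (y :: t) (r0 :: rest') := by
          unfold pvSliceB
          rw [htl, hr, pvCut_cons]
          simp
        have hA : pvSliceB (x :: y :: t) =
            (x :: (y :: t).take r0) :: pvCut (y :: t) (r0 :: rest') := by
          unfold pvSliceB
          rw [hsplit, if_neg hb]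
          have e1 : (([] ++ ((List.range t.length).filter (pvBrk (y :: t))).map Nat.succ).map
                  (· + 1 : Nat → Nat) ++ [(x :: y :: t).length]) =
              (((List.range t.length).filter (pvBrk (y :: t))).map (· + 1) ++
                  [(y :: t).length]).map (· + 1) := by
            simp [Nat.succ_eq_add_one, List.map_map, Function.comp_def]
          rw [e1, hr]
          simp only [List.map_cons]
          have e2 : ((r0 + 1) :: rest'.map (· + 1 : Nat → Nat)) = (r0 :: rest').map (· + 1) := by
            simp
          rw [pvCut_cons, e2, pvCut_shift]
          simp
        rw [hA]
        have hb' : pvStart y - pvFin x < 120000 := by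
          simp only [pvBrk, List.getD_cons_zero, List.getD_cons_succ, decide_eq_true_eq] at hb
          omega
        simp only [pvGrp, if_pos hb', ← ih, htail]

-- ===== VERDICT (by name: the statement is the Claim_ definition above) =====
theorem cluster_runs_spec : Claim_equal_cluster_runs := by
  intro testruns _ hpre
  unfold Spec_cluster_runs cluster_runs cluster_runs_alt
  have hsne : PySem.List.sorted testruns (fun r => pvFin r) false ≠ [] := by
    rw [Ne, PySem.List.sorted_eq_nil_iff]
    exact hpre.1
  obtain ⟨r0, rest, hs⟩ := List.exists_cons_of_ne_nil hsne
  simp only [hs, List.isEmpty_cons, List.drop_succ_cons, List.drop_zero, List.headD_cons,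
    if_neg (by simp : ¬ ((false : Bool) = true))]
  rw [pvA_eq_grp r0 rest]
  rw [pvB_eq_sliceB _, pvSliceB_eq_grp _ (by simp)]

-- cluster_runs_raises is the crash-fix claim: A raises IndexError on the empty list, B returns []
theorem cluster_runs_raises : Claim_raises_cluster_runs := by
  unfold Claim_raises_cluster_runs
  constructor
  · intro testruns _ hr hpre
    exact hpre.1 hr
  · exact ⟨by decide, rfl, by decide⟩

-- B's value at the raise witness, extracted from cluster_runs_raises (A raises IndexError there)
theorem cluster_runs_raises_ok :
    cluster_runs_alt pvRaiseWitness_cluster_runs = pvRaiseWitnessOut_cluster_runs :=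
  cluster_runs_raises.2.2.2
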